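-- pv_equiv track=rewrite | github.com/nario0715masa0619-create/video-sales-automation-phase1 | bounce_checker.py | is_test_email
-- ===== SOURCE A (Python) =====
-- TEST_DOMAINS = [
--     'example.com',
--     'test.com',
--     'sample.com',
--     'xx.co.jp',
--     'localhost',
--     'invalid.com',
--     'wixpress.com',  # Wix 自動生成アドレス
--     'sentry',        # Sentry の自動生成アドレス
-- ]
--
-- def is_test_email(email: str) -> bool:
--     """テスト用メールアドレスかどうか判定"""
--     if not email:
--         return False
--     email_lower = email.lower()
--     for test_domain in TEST_DOMAINS:
--         if test_domain in email_lower: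
--             return True
--     return False
-- ===== SOURCE B (Python) =====
-- TEST_DOMAINS = [
--     'example.com',
--     'test.com',
--     'sample.com',
--     'xx.co.jp',
--     'localhost',
--     'invalid.com',
--     'wixpress.com',
--     'sentry',
-- ]
--
-- def is_test_email(email: str) -> bool:
--     """One left-to-right scan: at each position test whether some domain starts there."""
--     if not email:
--         return False
--     el = email.lower()
--     return any(
--         any(el.startswith(d, i) for d in TEST_DOMAINS)
--         for i in range(len(el))
--     )
-- ===== Notes on version B (the rewrite author's own statement) =====
-- stated objective: alternative
-- what changed: Instead of eight independent substring-containment scans (one per domain), B makes a single left-to-right pass over the lowered email and at each position checks whether some domain begins there (startswith with an offset).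
import Mathlib
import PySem

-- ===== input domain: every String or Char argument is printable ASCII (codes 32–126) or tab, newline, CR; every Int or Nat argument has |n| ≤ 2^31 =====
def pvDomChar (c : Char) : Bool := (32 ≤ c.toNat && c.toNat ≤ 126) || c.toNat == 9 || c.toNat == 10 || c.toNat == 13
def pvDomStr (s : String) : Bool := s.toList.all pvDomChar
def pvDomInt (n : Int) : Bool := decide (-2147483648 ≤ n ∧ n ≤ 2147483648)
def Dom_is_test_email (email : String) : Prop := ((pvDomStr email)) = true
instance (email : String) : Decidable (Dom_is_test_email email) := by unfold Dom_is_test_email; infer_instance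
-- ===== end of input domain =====

-- B scans the lowered email once, checking at each position whether a domain starts there,
-- instead of A's one substring scan per domain; objective: alternative (same exact results).

-- ===== PORT A =====
def TEST_DOMAINS : List String :=
  ["example.com", "test.com", "sample.com", "xx.co.jp",
   "localhost", "invalid.com", "wixpress.com", "sentry"]

-- A's for-loop over TEST_DOMAINS with early return on 'test_domain in email_lower'
def aLoop (email_lower : String) : List String → Bool
  | [] => false
  | d :: ds => if PySem.Str.isIn d email_lower then true else aLoop email_lower ds

def is_test_email (email : String) : Bool :=
  if PySem.Str.len email == 0 then false
  else aLoop (PySem.Str.lower email) TEST_DOMAINS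

-- ===== PORT B =====
-- B's single scan: 'any(any(el.startswith(d, i) for d in TEST_DOMAINS) for i in range(len(el)))',
-- realised as structural recursion over the suffixes of the lowered email.
def bScan (cs : List Char) : Bool :=
  match cs with
  | [] => false
  | _ :: rest =>
    if TEST_DOMAINS.any (fun d => PySem.Chars.startswith cs d.toList) then true
    else bScan rest

def is_test_email_alt (email : String) : Bool :=
  if PySem.Str.len email == 0 then false
  else bScan (PySem.Chars.lower email.toList)

-- ===== PRECONDITION & SPEC =====
def Spec_is_test_email (email : String) (out : Bool) : Prop := out = is_test_email_alt email
instance (email : String) (out : Bool) : Decidable (Spec_is_test_email email out) := by unfold Spec_is_test_email; infer_instance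

-- ===== CLAIM (what is proved, stated in full; the proofs are below) =====
def Claim_equal_is_test_email : Prop := ∀ (email : String), Dom_is_test_email email → Spec_is_test_email email (is_test_email email)

-- ===== LEMMAS AND PROOFS =====

-- A's loop returns true iff some domain is an infix of the lowered email.
theorem aLoop_iff (s : String) (ds : List String) :
    aLoop s ds = true ↔ ∃ d ∈ ds, d.toList <:+: s.toList := by
  induction ds with
  | nil => simp [aLoop]
  | cons d ds ih =>
    rw [aLoop]
    by_cases h : PySem.Str.isIn d s = true
    · rw [if_pos h]
      simp [(PySem.Str.isIn_iff_infix d s).mp h]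
    · have h' : ¬ d.toList <:+: s.toList := fun hi => h ((PySem.Str.isIn_iff_infix d s).mpr hi)
      rw [if_neg h, ih]
      constructor
      · rintro ⟨e, he, hinf⟩; exact ⟨e, List.mem_cons_of_mem d he, hinf⟩
      · rintro ⟨e, he, hinf⟩
        rcases List.mem_cons.mp he with rfl | he'
        · exact absurd hinf h'
        · exact ⟨e, he', hinf⟩

-- B's scan returns true iff some domain is an infix of the scanned characters.
theorem bScan_iff (cs : List Char) :
    bScan cs = true ↔ ∃ d ∈ TEST_DOMAINS, d.toList <:+: cs := by
  induction cs with
  | nil => decide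
  | cons c rest ih =>
    rw [bScan]
    by_cases h : (TEST_DOMAINS.any fun d => PySem.Chars.startswith (c :: rest) d.toList) = true
    · rw [if_pos h]
      obtain ⟨d, hd, hsw⟩ := List.any_eq_true.mp h
      exact ⟨fun _ => ⟨d, hd, ((PySem.Chars.startswith_iff (c :: rest) d.toList).mp hsw).isInfix⟩,
             fun _ => rfl⟩
    · rw [if_neg h, ih]
      constructor
      · rintro ⟨d, hd, hinf⟩; exact ⟨d, hd, List.infix_cons hinf⟩
      · rintro ⟨d, hd, hinf⟩
        rcases List.infix_cons_iff.mp hinf with hpre | hinf'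
        · exact absurd (List.any_eq_true.mpr
            ⟨d, hd, (PySem.Chars.startswith_iff (c :: rest) d.toList).mpr hpre⟩) h
        · exact ⟨d, hd, hinf'⟩

-- ===== VERDICT (by name: the statement is the Claim_ definition above) =====
theorem is_test_email_spec : Claim_equal_is_test_email := by
  intro email _
  unfold Spec_is_test_email is_test_email is_test_email_alt
  by_cases h : (PySem.Str.len email == 0) = true
  · rw [if_pos h, if_pos h]
  · rw [if_neg h, if_neg h]
    have hl : (PySem.Str.lower email).toList = PySem.Chars.lower email.toList :=
      PySem.Str.toList_lower email
    rw [Bool.eq_iff_iff, aLoop_iff, bScan_iff, hl]
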